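-- pv_equiv track=rewrite | github.com/stefanes1/codewars | splitStrings.py | solution
-- ===== SOURCE A (Python) =====
-- def solution(s):
--     result = []
--     #if length of s is 0
--     if len(s) == 0:
--         return result
--
--     #if length of s is even
--     elif len(s) % 2 == 0:
--         for i in range(1, len(s), 2):
--             result.append(s[i-1] + s[i])
--         return result
--
--     #if length of s is odd
--     else:
--         for i in range(1, len(s) - 1, 2):
--             result.append(s[i-1] + s[i])
--
--         result.append(s[-1] + '_')
--         return result
--
--     pass
-- ===== SOURCE B (Python) =====
-- def solution(s):
--     if len(s) % 2 == 1:
--         s = s + '_'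
--     return [s[i:i+2] for i in range(0, len(s), 2)]
-- ===== Notes on version B (the rewrite author's own statement) =====
-- stated objective: simpler
-- what changed: Pads the string up front ('_' when the length is odd) and then builds all pairs in one uniform slice comprehension over range(0, len, 2), eliminating A's three-way parity branching and the special-cased last pair.
import Mathlib
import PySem

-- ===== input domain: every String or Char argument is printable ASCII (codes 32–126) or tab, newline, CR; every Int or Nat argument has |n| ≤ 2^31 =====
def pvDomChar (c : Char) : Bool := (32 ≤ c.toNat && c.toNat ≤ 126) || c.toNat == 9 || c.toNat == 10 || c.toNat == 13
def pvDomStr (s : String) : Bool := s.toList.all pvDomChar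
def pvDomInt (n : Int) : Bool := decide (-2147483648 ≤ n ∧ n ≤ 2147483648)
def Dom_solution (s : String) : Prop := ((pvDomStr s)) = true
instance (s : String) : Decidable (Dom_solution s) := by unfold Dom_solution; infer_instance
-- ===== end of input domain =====

-- B pads the string up front and builds the pairs in one uniform slice pass,
-- removing A's three-way parity branching; objective: simpler.

-- ===== PORT A =====
-- s[i] is always in range in A's loops, so the pyGetD default ' ' is never used.
def solution (s : String) : List String :=
  let cs := s.toList
  if cs.length = 0 then []
  else if cs.length % 2 = 0 then
    (PySem.List.pyRange 1 (cs.length : Int) 2).foldl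
      (fun result i =>
        result ++ [String.mk [PySem.List.pyGetD cs (i - 1) ' ', PySem.List.pyGetD cs i ' ']]) []
  else
    ((PySem.List.pyRange 1 ((cs.length : Int) - 1) 2).foldl
      (fun result i =>
        result ++ [String.mk [PySem.List.pyGetD cs (i - 1) ' ', PySem.List.pyGetD cs i ' ']]) [])
    ++ [String.mk [PySem.List.pyGetD cs (-1) ' ', '_']]

-- ===== PORT B =====
def solution_alt (s : String) : List String :=
  let cs := s.toList
  let cs2 := if cs.length % 2 = 1 then cs ++ ['_'] else cs
  (PySem.List.pyRange 0 (cs2.length : Int) 2).map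
    (fun i => String.mk (PySem.List.slice cs2 (some i) (some (i + 2))))

-- ===== PRECONDITION & SPEC =====
def Spec_solution (s : String) (out : List String) : Prop := out = solution_alt s
instance (s : String) (out : List String) : Decidable (Spec_solution s out) := by unfold Spec_solution; infer_instance

-- ===== CLAIM (what is proved, stated in full; the proofs are below) =====
def Claim_equal_solution : Prop := ∀ (s : String), Dom_solution s → Spec_solution s (solution s)

-- ===== LEMMAS AND PROOFS =====

/-- The intended pairing of a list of characters, two at a time, '_'-padded. -/
def pvPairs : List Char → List String
  | [] => []
  | [a] => [String.mk [a, '_']]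
  | a :: b :: t => String.mk [a, b] :: pvPairs t

theorem pvPyRangeTwoNil (a b : Int) (h : b ≤ a) : PySem.List.pyRange a b 2 = [] := by
  rw [PySem.List.pyRange_of_pos _ _ (by norm_num : (0:Int) < 2)]
  simp [show ¬ a < b by omega]

theorem pvPyRangeTwoCons (a b : Int) (h : a < b) :
    PySem.List.pyRange a b 2 = a :: PySem.List.pyRange (a + 2) b 2 := by
  rw [PySem.List.pyRange_of_pos _ _ (by norm_num : (0:Int) < 2),
      PySem.List.pyRange_of_pos _ _ (by norm_num : (0:Int) < 2)]
  have h1 : (if a < b then ((b - a + 2 - 1) / 2).toNat else 0)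
      = (if a + 2 < b then ((b - (a + 2) + 2 - 1) / 2).toNat else 0) + 1 := by
    split_ifs <;> omega
  rw [h1, List.range_succ_eq_map]
  simp only [List.map_cons, List.map_map]
  refine congrArg₂ _ (by norm_num) ?_
  apply List.map_congr_left
  intro k _
  simp [Function.comp, Nat.succ_eq_add_one]
  ring

theorem pvPairs_append (xs ys : List Char) (hx : xs.length % 2 = 0) :
    pvPairs (xs ++ ys) = pvPairs xs ++ pvPairs ys := by
  induction hn : xs.length using Nat.strong_induction_on generalizing xs with
  | _ n ih =>
    match xs, hn with
    | [], _ => simp [pvPairs]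
    | [a], hn => simp at hx
    | a :: b :: t, hn =>
      simp only [List.cons_append, pvPairs]
      rw [ih t.length (by simp at hn; omega) t (by simp at hx ⊢; omega) rfl]

theorem pvFoldA (whole : List Char) (n : Nat) : ∀ (a : Nat) (acc : List String),
    a + n ≤ whole.length → n % 2 = 0 →
    (PySem.List.pyRange ((a : Int) + 1) ((a : Int) + (n : Int)) 2).foldl
      (fun result i =>
        result ++ [String.mk [PySem.List.pyGetD whole (i - 1) ' ', PySem.List.pyGetD whole i ' ']]) acc
    = acc ++ pvPairs ((whole.drop a).take n) := by
  induction n using Nat.strong_induction_on with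
  | _ n ih =>
    match n with
    | 0 =>
      intro a acc _ _
      rw [pvPyRangeTwoNil _ _ (by omega)]
      simp [pvPairs]
    | 1 => intro a acc _ h; omega
    | (k+2) =>
      intro a acc hlen hk
      rw [pvPyRangeTwoCons _ _ (by omega)]
      rw [List.foldl_cons]
      have e1 : ((a : Int) + 1 - 1) = ((a : Nat) : Int) := by omega
      have e2 : ((a : Int) + 1) = (((a + 1 : Nat)) : Int) := by push_cast; omega
      have e3 : (((a + 1 : Nat)) : Int) + 2 = (((a + 2 : Nat)) : Int) + 1 := by push_cast; ring
      have e4 : ((a : Int) + ((k + 2 : Nat) : Int)) = (((a + 2 : Nat)) : Int) + ((k : Nat) : Int) := by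
        push_cast; ring
      rw [e1, PySem.List.pyGetD_natCast, e2, PySem.List.pyGetD_natCast, e3, e4]
      rw [ih k (by omega) (a + 2) _ (by omega) (by omega)]
      have ha : a < whole.length := by omega
      have ha1 : a + 1 < whole.length := by omega
      rw [List.getD_eq_getElem _ _ ha, List.getD_eq_getElem _ _ ha1]
      rw [List.drop_eq_getElem_cons ha, List.drop_eq_getElem_cons ha1]
      rw [show k + 2 = (k + 1) + 1 from rfl]
      simp only [List.take_succ_cons, pvPairs, List.append_assoc]
      rw [show a + 1 + 1 = a + 2 from rfl]
      simp

theorem pvMapB (whole : List Char) (n : Nat) : ∀ (a : Nat),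
    a + n ≤ whole.length → n % 2 = 0 →
    (PySem.List.pyRange ((a : Int)) ((a : Int) + (n : Int)) 2).map
      (fun i => String.mk (PySem.List.slice whole (some i) (some (i + 2))))
    = pvPairs ((whole.drop a).take n) := by
  induction n using Nat.strong_induction_on with
  | _ n ih =>
    match n with
    | 0 =>
      intro a _ _
      rw [pvPyRangeTwoNil _ _ (by omega)]
      simp [pvPairs]
    | 1 => intro a _ h; omega
    | (k+2) =>
      intro a hlen hk
      rw [pvPyRangeTwoCons _ _ (by push_cast; omega)]
      rw [List.map_cons]
      have e2 : ((a : Int) + 2) = ((a : Int) + ((2 : Nat) : Int)) := by push_cast; ring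
      have e3 : ((a : Int) + 2) = (((a + 2 : Nat)) : Int) := by push_cast; ring
      have e4 : ((a : Int) + ((k + 2 : Nat) : Int)) = (((a + 2 : Nat)) : Int) + ((k : Nat) : Int) := by
        push_cast; ring
      rw [show (PySem.List.slice whole (some ((a : Int))) (some ((a : Int) + 2)))
            = List.take 2 (List.drop a whole) by
        rw [e2, PySem.List.slice_natCast_add]]
      rw [e3, e4, ih k (by omega) (a + 2) (by omega) (by omega)]
      have ha : a < whole.length := by omega
      have ha1 : a + 1 < whole.length := by omega
      rw [List.drop_eq_getElem_cons ha, List.drop_eq_getElem_cons ha1]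
      rw [show k + 2 = (k + 1) + 1 from rfl]
      simp only [List.take_succ_cons, List.take_zero, pvPairs]

theorem pvA0 (whole : List Char) (n : Nat) (h : n ≤ whole.length) (hn : n % 2 = 0) :
    (PySem.List.pyRange 1 (n : Int) 2).foldl
      (fun result i =>
        result ++ [String.mk [PySem.List.pyGetD whole (i - 1) ' ', PySem.List.pyGetD whole i ' ']]) []
    = pvPairs (whole.take n) := by
  have := pvFoldA whole n 0 [] (by omega) hn
  simpa using this

theorem pvB0 (whole : List Char) (n : Nat) (h : n ≤ whole.length) (hn : n % 2 = 0) :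
    (PySem.List.pyRange 0 (n : Int) 2).map
      (fun i => String.mk (PySem.List.slice whole (some i) (some (i + 2))))
    = pvPairs (whole.take n) := by
  have := pvMapB whole n 0 (by omega) hn
  simpa using this

-- ===== VERDICT (by name: the statement is the Claim_ definition above) =====
theorem solution_spec : Claim_equal_solution := by
  intro s _
  unfold Spec_solution solution solution_alt
  simp only []
  generalize s.toList = cs
  by_cases h0 : cs.length = 0
  · have hnil : cs = [] := List.eq_nil_of_length_eq_zero h0
    simp [hnil, pvPyRangeTwoNil 0 0 le_rfl]
  · by_cases he : cs.length % 2 = 0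
    · rw [if_neg h0, if_pos he, if_neg (by omega : ¬ cs.length % 2 = 1)]
      rw [pvA0 cs cs.length le_rfl he, pvB0 cs cs.length le_rfl he]
    · have hne : cs ≠ [] := by intro h; simp [h] at h0
      obtain ⟨d, x, rfl⟩ : ∃ d x, cs = d ++ [x] :=
        ⟨cs.dropLast, cs.getLast hne, (List.dropLast_append_getLast hne).symm⟩
      have hm : d.length % 2 = 0 := by simp at he ⊢; omega
      rw [if_neg h0, if_neg he, if_pos (by simp at he ⊢; omega : (d ++ [x]).length % 2 = 1)]
      have hb1 : (((d ++ [x]).length : Nat) : Int) - 1 = ((d.length : Nat) : Int) := by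
        simp
      rw [hb1, pvA0 (d ++ [x]) d.length (by simp) hm]
      rw [pvB0 ((d ++ [x]) ++ ['_']) ((d ++ [x]) ++ ['_']).length le_rfl (by simp at he ⊢; omega)]
      rw [List.take_length, List.take_left]
      have hx : PySem.List.pyGetD (d ++ [x]) (-1) ' ' = x := by
        simp [PySem.List.pyGetD, PySem.List.pyGet?_neg_one_append_singleton]
      rw [hx]
      rw [show (d ++ [x]) ++ ['_'] = d ++ [x, '_'] by simp]
      rw [pvPairs_append d [x, '_'] hm]
      simp [pvPairs]
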